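-- pv_equiv track=rewrite | github.com/BarriosA2I/website-assistant-v2 | backend/agents/persona_generator.py | extract_persona_context
-- ===== SOURCE A (Python) =====
-- from typing import Dict, Any, Optional, List
--
-- def extract_persona_context(message: str) -> Dict[str, Any]:
--     """Extract context from message to select appropriate persona."""
--     msg_lower = message.lower()
--
--     context = {
--         "industry": None,
--         "company_size": None,
--         "role": None,
--     }
--
--     # Detect industry hints
--     if any(word in msg_lower for word in ["agency", "agencies", "creative"]):
--         context["industry"] = "agency"
--     elif any(word in msg_lower for word in ["ecommerce", "e-commerce", "retail", "dtc"]):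
--         context["industry"] = "ecommerce"
--     elif any(word in msg_lower for word in ["saas", "software", "tech", "b2b"]):
--         context["industry"] = "b2b_saas"
--
--     # Detect company size hints
--     if any(word in msg_lower for word in ["enterprise", "large", "fortune"]):
--         context["company_size"] = "enterprise"
--     elif any(word in msg_lower for word in ["startup", "small", "smb"]):
--         context["company_size"] = "small"
--     else:
--         context["company_size"] = "mid_market"
--
--     return context
-- ===== SOURCE B (Python) =====
-- _WORDS = [
--     "agency", "agencies", "creative",
--     "ecommerce", "e-commerce", "retail", "dtc",
--     "saas", "software", "tech", "b2b",
--     "enterprise", "large", "fortune",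
--     "startup", "small", "smb",
-- ]
--
-- _INDUSTRY_RULES = [
--     ("agency", ["agency", "agencies", "creative"]),
--     ("ecommerce", ["ecommerce", "e-commerce", "retail", "dtc"]),
--     ("b2b_saas", ["saas", "software", "tech", "b2b"]),
-- ]
--
-- _SIZE_RULES = [
--     ("enterprise", ["enterprise", "large", "fortune"]),
--     ("small", ["startup", "small", "smb"]),
-- ]
--
--
-- def extract_persona_context(message: str):
--     """Extract context from message to select appropriate persona."""
--     msg = message.lower()
--
--     # Single scan over the text: at each position, record every keyword that
--     # starts there.  Afterwards the priority rules are decided from the hit set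
--     # alone, without touching the text again.
--     hits = set()
--     for i in range(len(msg)):
--         for w in _WORDS:
--             if msg.startswith(w, i):
--                 hits.add(w)
--
--     industry = next((v for v, g in _INDUSTRY_RULES if any(w in hits for w in g)), None)
--     size = next((v for v, g in _SIZE_RULES if any(w in hits for w in g)), "mid_market")
--
--     return {"industry": industry, "company_size": size, "role": None}
-- ===== Notes on version B (the rewrite author's own statement) =====
-- stated objective: alternative
-- what changed: Replaces A's per-keyword substring membership tests in two if/elif cascades with a single left-to-right scan of the text that collects every keyword starting at each position into a hit set, after which industry and company size are decided from the hit set alone via ordered rule tables.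
import Mathlib
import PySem

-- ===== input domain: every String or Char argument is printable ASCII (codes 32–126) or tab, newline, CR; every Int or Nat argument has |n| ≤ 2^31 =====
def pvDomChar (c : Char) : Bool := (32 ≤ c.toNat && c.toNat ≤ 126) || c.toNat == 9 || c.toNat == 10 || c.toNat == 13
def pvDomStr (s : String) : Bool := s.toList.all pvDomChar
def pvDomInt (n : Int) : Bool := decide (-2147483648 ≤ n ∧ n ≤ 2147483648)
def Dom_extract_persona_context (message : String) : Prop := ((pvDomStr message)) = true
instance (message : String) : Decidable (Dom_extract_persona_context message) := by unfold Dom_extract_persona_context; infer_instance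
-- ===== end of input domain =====

-- B replaces A's per-keyword substring tests with a single left-to-right scan of the
-- text that collects every keyword starting at each position into a hit set, then
-- decides the priority rules from the hit set alone (alternative algorithm, same cost).

-- ===== PORT A =====
def extract_persona_context (message : String) : List (String × Option String) :=
  let msg_lower := PySem.Str.lower message
  let context : PySem.Dict String (Option String) :=
    PySem.Dict.ofList [("industry", none), ("company_size", none), ("role", none)]
  let context :=
    if (["agency", "agencies", "creative"]).any (fun w => PySem.Str.isIn w msg_lower) then
      context.insert "industry" (some "agency")
    else if (["ecommerce", "e-commerce", "retail", "dtc"]).any (fun w => PySem.Str.isIn w msg_lower) then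
      context.insert "industry" (some "ecommerce")
    else if (["saas", "software", "tech", "b2b"]).any (fun w => PySem.Str.isIn w msg_lower) then
      context.insert "industry" (some "b2b_saas")
    else context
  let context :=
    if (["enterprise", "large", "fortune"]).any (fun w => PySem.Str.isIn w msg_lower) then
      context.insert "company_size" (some "enterprise")
    else if (["startup", "small", "smb"]).any (fun w => PySem.Str.isIn w msg_lower) then
      context.insert "company_size" (some "small")
    else
      context.insert "company_size" (some "mid_market")
  context.items

-- ===== PORT B =====
def pvWords : List String :=
  ["agency", "agencies", "creative",
   "ecommerce", "e-commerce", "retail", "dtc",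
   "saas", "software", "tech", "b2b",
   "enterprise", "large", "fortune",
   "startup", "small", "smb"]

def pvIndustryRules : List (String × List String) :=
  [("agency", ["agency", "agencies", "creative"]),
   ("ecommerce", ["ecommerce", "e-commerce", "retail", "dtc"]),
   ("b2b_saas", ["saas", "software", "tech", "b2b"])]

def pvSizeRules : List (String × List String) :=
  [("enterprise", ["enterprise", "large", "fortune"]),
   ("small", ["startup", "small", "smb"])]

-- the scan: for i in range(len(msg)): for w in _WORDS: if msg.startswith(w, i): hits.add(w)
-- msg.startswith(w, i) with 0 ≤ i is exactly "w.toList is a prefix of msg.drop i" (hand port, exact here)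
def pvHits (msg : List Char) : PySem.Set String :=
  (PySem.List.pyRange 0 (msg.length : Int) 1).foldl
    (fun hits i =>
      pvWords.foldl
        (fun h w => if PySem.Chars.startswith (msg.drop i.toNat) w.toList then PySem.Set.add h w else h)
        hits)
    PySem.Set.empty

-- next((v for v, g in rules if any(w in hits for w in g)), default handled by caller)
def pvFirstMatch (hits : PySem.Set String) (rules : List (String × List String)) : Option String :=
  match rules with
  | [] => none
  | (v, g) :: rest =>
      if g.any (fun w => PySem.Set.contains hits w) then some v else pvFirstMatch hits rest

def extract_persona_context_alt (message : String) : List (String × Option String) :=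
  let msg := (PySem.Str.lower message).toList
  let hits := pvHits msg
  let industry := pvFirstMatch hits pvIndustryRules
  let size := (pvFirstMatch hits pvSizeRules).getD "mid_market"
  [("industry", industry), ("company_size", some size), ("role", none)]

-- ===== PRECONDITION & SPEC =====
def Spec_extract_persona_context (message : String) (out : List (String × Option String)) : Prop := out = extract_persona_context_alt message
instance (message : String) (out : List (String × Option String)) : Decidable (Spec_extract_persona_context message out) := by unfold Spec_extract_persona_context; infer_instance

-- ===== CLAIM =====
def Claim_equal_extract_persona_context : Prop := ∀ (message : String), Dom_extract_persona_context message → Spec_extract_persona_context message (extract_persona_context message)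

-- ===== LEMMAS AND PROOFS =====

-- membership after the inner fold over the word list
lemma pv_mem_foldl_words (P : String → Bool) (h : PySem.Set String) (ws : List String) (x : String) :
    x ∈ ws.foldl (fun h w => if P w then PySem.Set.add h w else h) h ↔
      x ∈ h ∨ (x ∈ ws ∧ P x = true) := by
  induction ws generalizing h with
  | nil => simp
  | cons w rest ih =>
    simp only [List.foldl_cons, ih, List.mem_cons]
    by_cases hp : P w = true
    · simp only [hp, if_true, PySem.Set.mem_add]
      constructor
      · rintro (⟨hx | rfl⟩ | ⟨hx, hpx⟩)
        · exact Or.inl hx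
        · exact Or.inr ⟨Or.inl rfl, hp⟩
        · exact Or.inr ⟨Or.inr hx, hpx⟩
      · rintro (hx | ⟨rfl | hx, hpx⟩)
        · exact Or.inl (Or.inl hx)
        · exact Or.inl (Or.inr rfl)
        · exact Or.inr ⟨hx, hpx⟩
    · simp only [hp]
      constructor
      · rintro (hx | ⟨hx, hpx⟩)
        · exact Or.inl hx
        · exact Or.inr ⟨Or.inr hx, hpx⟩
      · rintro (hx | ⟨rfl | hx, hpx⟩)
        · exact Or.inl hx
        · exact absurd hpx hp
        · exact Or.inr ⟨hx, hpx⟩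

-- membership after the outer fold over the positions
lemma pv_mem_foldl_range (msg : List Char) (l : List Int) (h : PySem.Set String) (x : String) :
    x ∈ l.foldl
        (fun hits i =>
          pvWords.foldl
            (fun h w => if PySem.Chars.startswith (msg.drop i.toNat) w.toList then PySem.Set.add h w else h)
            hits)
        h ↔
      x ∈ h ∨ ∃ i ∈ l, x ∈ pvWords ∧ PySem.Chars.startswith (msg.drop i.toNat) x.toList = true := by
  induction l generalizing h with
  | nil => simp
  | cons i rest ih =>
    simp only [List.foldl_cons, ih, pv_mem_foldl_words, List.mem_cons]
    constructor
    · rintro (⟨hx | ⟨hw, hs⟩⟩ | ⟨j, hj, hw, hs⟩)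
      · exact Or.inl hx
      · exact Or.inr ⟨i, Or.inl rfl, hw, hs⟩
      · exact Or.inr ⟨j, Or.inr hj, hw, hs⟩
    · rintro (hx | ⟨j, hj | hj, hw, hs⟩)
      · exact Or.inl (Or.inl hx)
      · exact Or.inl (Or.inr ⟨hw, hj ▸ hs⟩)
      · exact Or.inr ⟨j, hj, hw, hs⟩

lemma pv_contains_hits (msg : List Char) (w : String) (hw : w ∈ pvWords) (hne : w.toList ≠ []) :
    PySem.Set.contains (pvHits msg) w = PySem.Chars.isIn w.toList msg := by
  have hmem : w ∈ pvHits msg ↔ PySem.Chars.isIn w.toList msg = true := by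
    unfold pvHits
    rw [pv_mem_foldl_range]
    rw [← PySem.Chars.exists_prefix_drop_iff_isIn]
    constructor
    · rintro (hx | ⟨i, hi, _, hs⟩)
      · simp [PySem.Set.empty] at hx
      · exact ⟨i.toNat, (PySem.Chars.startswith_iff _ _).mp hs⟩
    · rintro ⟨j, hj⟩
      have hdrop : msg.drop j ≠ [] := by
        intro hnil
        rw [hnil] at hj
        exact hne (List.prefix_nil.mp hj)
      have hjlt : j < msg.length := by
        by_contra hle
        exact hdrop (List.drop_eq_nil_of_le (le_of_not_gt hle))
      refine Or.inr ⟨(j : Int), ?_, hw, ?_⟩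
      · rw [PySem.List.mem_pyRange_one]
        exact ⟨Int.natCast_nonneg j, by exact_mod_cast hjlt⟩
      · rw [PySem.Chars.startswith_iff]
        simpa using hj
  rw [Bool.eq_iff_iff]
  exact (PySem.Set.contains_iff _ _).trans hmem

-- A's result as a function of the five `any(...)` booleans
def pvAbool (b1 b2 b3 b4 b5 : Bool) : List (String × Option String) :=
  let context : PySem.Dict String (Option String) :=
    PySem.Dict.ofList [("industry", none), ("company_size", none), ("role", none)]
  let context :=
    if b1 then context.insert "industry" (some "agency")
    else if b2 then context.insert "industry" (some "ecommerce")
    else if b3 then context.insert "industry" (some "b2b_saas")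
    else context
  let context :=
    if b4 then context.insert "company_size" (some "enterprise")
    else if b5 then context.insert "company_size" (some "small")
    else context.insert "company_size" (some "mid_market")
  context.items

-- B's result as a function of the same five booleans
def pvBbool (b1 b2 b3 b4 b5 : Bool) : List (String × Option String) :=
  let industry := if b1 then some "agency" else if b2 then some "ecommerce"
                  else if b3 then some "b2b_saas" else none
  let size := (if b4 then some "enterprise" else if b5 then some "small" else none).getD "mid_market"
  [("industry", industry), ("company_size", some size), ("role", none)]

lemma pvA_eq (message : String) :
    extract_persona_context message =
      pvAbool
        ((["agency", "agencies", "creative"]).any (fun w => PySem.Chars.isIn w.toList (PySem.Str.lower message).toList))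
        ((["ecommerce", "e-commerce", "retail", "dtc"]).any (fun w => PySem.Chars.isIn w.toList (PySem.Str.lower message).toList))
        ((["saas", "software", "tech", "b2b"]).any (fun w => PySem.Chars.isIn w.toList (PySem.Str.lower message).toList))
        ((["enterprise", "large", "fortune"]).any (fun w => PySem.Chars.isIn w.toList (PySem.Str.lower message).toList))
        ((["startup", "small", "smb"]).any (fun w => PySem.Chars.isIn w.toList (PySem.Str.lower message).toList)) := by
  simp only [extract_persona_context, pvAbool, PySem.Str.isIn_eq]
  rfl

lemma pvB_eq (message : String) :
    extract_persona_context_alt message =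
      pvBbool
        ((["agency", "agencies", "creative"]).any (fun w => PySem.Chars.isIn w.toList (PySem.Str.lower message).toList))
        ((["ecommerce", "e-commerce", "retail", "dtc"]).any (fun w => PySem.Chars.isIn w.toList (PySem.Str.lower message).toList))
        ((["saas", "software", "tech", "b2b"]).any (fun w => PySem.Chars.isIn w.toList (PySem.Str.lower message).toList))
        ((["enterprise", "large", "fortune"]).any (fun w => PySem.Chars.isIn w.toList (PySem.Str.lower message).toList))
        ((["startup", "small", "smb"]).any (fun w => PySem.Chars.isIn w.toList (PySem.Str.lower message).toList)) := by
  simp only [extract_persona_context_alt, pvFirstMatch, pvIndustryRules, pvSizeRules,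
    List.any_cons, List.any_nil]
  rw [pv_contains_hits _ "agency" (by decide) (by decide),
      pv_contains_hits _ "agencies" (by decide) (by decide),
      pv_contains_hits _ "creative" (by decide) (by decide),
      pv_contains_hits _ "ecommerce" (by decide) (by decide),
      pv_contains_hits _ "e-commerce" (by decide) (by decide),
      pv_contains_hits _ "retail" (by decide) (by decide),
      pv_contains_hits _ "dtc" (by decide) (by decide),
      pv_contains_hits _ "saas" (by decide) (by decide),
      pv_contains_hits _ "software" (by decide) (by decide),
      pv_contains_hits _ "tech" (by decide) (by decide),
      pv_contains_hits _ "b2b" (by decide) (by decide),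
      pv_contains_hits _ "enterprise" (by decide) (by decide),
      pv_contains_hits _ "large" (by decide) (by decide),
      pv_contains_hits _ "fortune" (by decide) (by decide),
      pv_contains_hits _ "startup" (by decide) (by decide),
      pv_contains_hits _ "small" (by decide) (by decide),
      pv_contains_hits _ "smb" (by decide) (by decide)]
  simp only [pvBbool]

lemma pvAB_eq (b1 b2 b3 b4 b5 : Bool) : pvAbool b1 b2 b3 b4 b5 = pvBbool b1 b2 b3 b4 b5 := by
  cases b1 <;> cases b2 <;> cases b3 <;> cases b4 <;> cases b5 <;> decide

-- ===== VERDICT =====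
theorem extract_persona_context_spec : Claim_equal_extract_persona_context := by
  intro message _
  unfold Spec_extract_persona_context
  rw [pvA_eq, pvB_eq, pvAB_eq]
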